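/- GENERATED by tools/from_farm_form.py from prooffarm-gif/accepted/DGifGetScreenDesc.6/Lemmas.lean (a worked proof of the farm's unit `DGifGetScreenDesc.6`,
   accepted by the verdict) — do not edit. -/
import Gif.Spec.Units.DGifGetScreenDesc_6
import Gif.Spec.AllSegs

/-!
  Lemmas for the unit `DGifGetScreenDesc.6` (segment 6 of `DGifGetScreenDesc`, 108284H … 108253H, dgif_lib.c:296-298 and `i++`):
  the three checked byte stores `Colors[i].Red / Green / Blue` of the colour loop.

      sd6_where     where gif, the map object and the colour array are, as numbers (what the walker, `u_omega`, `u_same` need to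
                    place every load and store), and that the colour array is far from gif and from the map object [FO2]
      sd6_carry     THE LOOP INVARIANT `Head` THROUGH A FOOTPRINT: a later state that wrote only the check routines' return-address
                    slot `[RA − 128, RA − 120)` and a window of the colour array (a DATA object: `Loose.data`) satisfies `Head` again
      sd6_inc       `add r13d, 1` on a counter below `2 ^ 31`
      sd6_seg       THE SEGMENT: one walk 108284H … 108253H, the seven check goals, the exit by `sd6_carry`
-/

open X86 X86.User Asan ProgX.Base ProgX.Base.Spec Gif.Spec

set_option maxRecDepth 4000
set_option maxHeartbeats 4000000

namespace Gif.Spec.DGifGetScreenDesc_6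

/-- **Where gif, the map object and the colour array are** (numbers for `v_side`, `u_same`, `u_omega` and the walker's own placement
of the loads): all three above the stack (`800040H ≤ base`), their red zones below the shadow (`C00000H`); the colour array is at
least 64 bytes away from the map object and from gif [FO2], so a byte store into it keeps `gif.SColorMap` and `map.Colors`. -/
theorem sd6_where {Hc : Heap} {F : Forest} {R : Rd} {mp : Map} {mem : Mem}
    (hok : GifOK Hc (DGifGetScreenDesc.withMap F mp) R mem) (hheap : HeapOK Hc mem) (hbase : Hc.base = 0x800000) :
    (0x800040 ≤ F.gif ∧ F.gif + 152 ≤ 0xC00000) ∧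
    (0x800040 ≤ mp.obj ∧ mp.obj + 56 ≤ 0xC00000) ∧
    (0x800040 ≤ mp.colors ∧ mp.colors + 3 * mp.count + 32 ≤ 0xC00000) ∧
    (mp.colors + 3 * mp.count + 64 ≤ mp.obj ∨ mp.obj + 88 ≤ mp.colors) ∧
    (mp.colors + 3 * mp.count + 64 ≤ F.gif ∨ F.gif + 184 ≤ mp.colors) := by
  -- the three objects are owned
  have hmg : (F.gif, 120) ∈ (DGifGetScreenDesc.withMap F mp).owned := List.mem_cons_self
  have hmo : (mp.obj, 24) ∈ (DGifGetScreenDesc.withMap F mp).owned :=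
    Forest.mem_owned_scm (F := DGifGetScreenDesc.withMap F mp) List.mem_cons_self
  have hmc : (mp.colors, 3 * mp.count) ∈ (DGifGetScreenDesc.withMap F mp).owned :=
    Forest.mem_owned_scm (F := DGifGetScreenDesc.withMap F mp) (List.mem_cons_of_mem _ List.mem_cons_self)
  have hgin := hok.owns.inside hheap hmg
  have hoin := hok.owns.inside hheap hmo
  have hcin := hok.owns.inside hheap hmc
  simp only at hgin hoin hcin
  rw [hbase] at hgin hoin hcin
  -- the colour array and the map object have different bases
  have hneoc : mp.colors ≠ mp.obj := (hok.scm_live (m := mp) rfl).2.2.1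
  have hfar1 := hok.owns.far hheap hmc hmo (fun h => hneoc (congrArg Prod.fst h))
  -- the colour array and gif have different bases (gif is the head of the list, the colour array is in its tail)
  have hgne : F.gif ≠ mp.colors := by
    have htail : (mp.colors, 3 * mp.count) ∈
        (F.pv, 24936) :: (Map.objs (some mp) ++ Map.objs F.icm ++ Saved.objs F.saved ++ Exts.objs F.pend) := by
      apply List.mem_cons_of_mem
      apply List.mem_append_left
      apply List.mem_append_left
      apply List.mem_append_left
      exact List.mem_cons_of_mem _ List.mem_cons_self
    exact hok.owns.of_cons.2.2 (mp.colors, 3 * mp.count) htail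
  have hfar2 := hok.owns.far hheap hmc hmg (fun h => hgne (congrArg Prod.fst h).symm)
  simp only at hfar1 hfar2
  omega

/-- **`add r13d, 1`** (10830CH, `i++`) on a register that holds a non-negative `int` below `2 ^ 31 − 1`: the register holds `i + 1`. -/
theorem sd6_inc (x : Word) (h : x.toNat + 1 < 2 ^ 31) : (Word.ofBV (Word.part .w32 x + 1#32)).toNat = x.toNat + 1 := by
  have e1 : (1#32).toNat = 1 := by decide
  rw [toNat_ofBV32, BitVec.toNat_add, toNat_part32, e1]
  have e2 : (2 : Nat) ^ Width.w32.bits = 2 ^ 32 := by decide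
  rw [e2]
  omega

/-- **THE LOOP INVARIANT THROUGH THE SEGMENT'S FOOTPRINT.** `Head` holds at `v`; the later state `s` differs from `v` in the slot of
the check routines' return address `[RA − 128, RA − 120)` and in a window `[lo, hi)` of the colour array only, no shadow byte was
written, `rsp`, `rbx`, `rbp` are `v`'s: then `Head` holds at `s`, for the measure `m'` that fits `r13`. The colour array is a DATA
object of the forest (`Loose.data`) and a live object of the heap (`HeapWin.live`); the stack slot lies below the cursor
(`Loose.stack`). -/
theorem sd6_carry {cut cut' : Word} {H : Heap} {rest : List Obj} {frames : List (Nat × FrameLayout)} {F : Forest} {R : Rd}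
    {Hc : Heap} {mp : Map} {m m' : Nat} {u₀ e : State} {ret : Word} {v s : State}
    (hh : DGifGetScreenDesc.Head cut H rest frames F R Hc mp m u₀ e ret v)
    (hrip : s.rip = cut') (hrsp : s.reg .rsp = e.reg .rsp - 120)
    (hrbx : s.reg .rbx = v.reg .rbx) (hrbp : s.reg .rbp = v.reg .rbp)
    (hcode : Mem.EqOn ProgX.Base.L.textLo ProgX.Base.L.textHi u₀.mem s.mem) (habi : (conv u₀).inv s)
    (hun : ShadowUntouched v.mem s.mem) {lo hi : Nat}
    (hs : Mem.SameExcept [⟨(e.reg .rsp).toNat - 128, (e.reg .rsp).toNat - 120⟩, ⟨lo, hi⟩] v.mem s.mem)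
    (hlo : mp.colors ≤ lo) (hhi : hi ≤ mp.colors + 3 * mp.count)
    (hidx : (s.reg .r13).toNat + m' = mp.count) :
    DGifGetScreenDesc.Head cut' H rest frames F R Hc mp m' u₀ e ret s := by
  obtain ⟨hcore, hregion, hinv, hok, _⟩ := hh
  have henv : Env H rest frames F R e := hcore.pre.1
  have hroom : 0x700000 + 400 ≤ (e.reg .rsp).toNat := hcore.entry.room
  have htop : (e.reg .rsp).toNat + 8 ≤ 0x800000 := hcore.entry.top
  have hcur := henv.ctx.cursor_range henv.heap.inv.shadow
  have hbase : Hc.base = 0x800000 := hregion.1.trans henv.heap.base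
  have hheap := hinv.heap
  obtain ⟨_, _, hcin, _, _⟩ := sd6_where hok hheap hbase
  have hlcol : Hc.Live mp.colors (3 * mp.count) := (hok.scm_live (m := mp) rfl).2.1
  have hlt := (e.reg .rsp).toNat_lt
  -- the two windows, one by one
  have hwin : ∀ w, w ∈ [(⟨(e.reg .rsp).toNat - 128, (e.reg .rsp).toNat - 120⟩ : Span), ⟨lo, hi⟩] →
      w = ⟨(e.reg .rsp).toNat - 128, (e.reg .rsp).toNat - 120⟩ ∨ w = ⟨lo, hi⟩ := by
    intro w hw
    rcases List.mem_cons.mp hw with h1 | h2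
    · exact Or.inl h1
    · exact Or.inr (List.mem_singleton.mp h2)
  -- every window misses the saved registers' slots and the return address `[RA − 48, RA + 8)`
  have hslots : ∀ a k : Nat, (e.reg .rsp).toNat - 48 ≤ a → a + k ≤ (e.reg .rsp).toNat + 8 →
      ∀ w, w ∈ [(⟨(e.reg .rsp).toNat - 128, (e.reg .rsp).toNat - 120⟩ : Span), ⟨lo, hi⟩] → a + k ≤ w.lo ∨ w.hi ≤ a := by
    intro a k h1 h2 w hw
    rcases hwin w hw with e1 | e1
    · rw [e1]
      simp only
      omega
    · rw [e1]
      simp only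
      omega
  -- every window is loose for the forest with the map
  have hloose : ∀ w, w ∈ [(⟨(e.reg .rsp).toNat - 128, (e.reg .rsp).toNat - 120⟩ : Span), ⟨lo, hi⟩] →
      Loose Hc (DGifGetScreenDesc.withMap F mp) R w := by
    intro w hw
    rcases hwin w hw with e1 | e1
    · rw [e1]
      exact Loose.stack hheap (by simp only; omega) (by simp only; omega) (by simp only; omega)
    · rw [e1]
      have hd : (mp.colors, 3 * mp.count) ∈ (DGifGetScreenDesc.withMap F mp).datas := by
        apply List.mem_append_left
        apply List.mem_append_left
        apply List.mem_append_left
        exact List.mem_cons_self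
      exact Loose.data hheap hok.owns hd hlo hhi
  -- every window is a heap window
  have hheapwin : ∀ w, w ∈ [(⟨(e.reg .rsp).toNat - 128, (e.reg .rsp).toNat - 120⟩ : Span), ⟨lo, hi⟩] → HeapWin Hc w := by
    intro w hw
    rcases hwin w hw with e1 | e1
    · rw [e1]
      apply HeapWin.offHeap hheap
      left
      simp only
      omega
    · rw [e1]
      exact HeapWin.live hheap hlcol hlo hhi
  -- the reader's measure
  have hrem : rem R s.mem = rem R v.mem := by
    apply rem_sameExcept hs (by omega)
    intro w hw
    rcases hwin w hw with e1 | e1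
    · rw [e1]
      simp only
      omega
    · rw [e1]
      simp only
      omega
  -- the footprint since the entry: both windows lie inside the function's
  have hsame : Mem.SameExcept
      [⟨(e.reg .rsp).toNat - 400, (e.reg .rsp).toNat⟩,
       shadowSpan ((e.reg .rsp).toNat - 120) ((e.reg .rsp).toNat - 56),
       ⟨0x800000, 0x1000020⟩,
       ⟨R.cur, R.cur + 8⟩] e.mem s.mem := by
    apply hcore.same.step_same hs
    intro w hw a h1 h2
    rcases hwin w hw with e1 | e1
    · rw [e1] at h1 h2
      simp only at h1 h2
      refine ⟨_, List.mem_cons_self, ?_, ?_⟩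
      · simp only
        omega
      · simp only
        omega
    · rw [e1] at h1 h2
      simp only at h1 h2
      refine ⟨_, List.mem_cons_of_mem _ (List.mem_cons_of_mem _ List.mem_cons_self), ?_, ?_⟩
      · simp only
        omega
      · simp only
        omega
  -- THE ASSERTION
  refine ⟨?_, hregion, hinv.sameExcept hun hs hheapwin, hok.sameExcept hheap ⟨hcur.1, hcur.2.1⟩ hs hloose, hidx⟩
  exact {
    entry := hcore.entry
    pre := hcore.pre
    rip := hrip
    rsp := hrsp
    rbx := hrbx.trans hcore.rbx
    rbp := hrbp.trans hcore.rbp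
    slot_r15 := slot_sameExcept hs (e.reg .rsp) 8 8 _ (by omega) (by omega) hcore.slot_r15 (hslots _ _ (by omega) (by omega))
    slot_r14 := slot_sameExcept hs (e.reg .rsp) 16 8 _ (by omega) (by omega) hcore.slot_r14 (hslots _ _ (by omega) (by omega))
    slot_r13 := slot_sameExcept hs (e.reg .rsp) 24 8 _ (by omega) (by omega) hcore.slot_r13 (hslots _ _ (by omega) (by omega))
    slot_r12 := slot_sameExcept hs (e.reg .rsp) 32 8 _ (by omega) (by omega) hcore.slot_r12 (hslots _ _ (by omega) (by omega))
    slot_rbp := slot_sameExcept hs (e.reg .rsp) 40 8 _ (by omega) (by omega) hcore.slot_rbp (hslots _ _ (by omega) (by omega))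
    slot_rbx := slot_sameExcept hs (e.reg .rsp) 48 8 _ (by omega) (by omega) hcore.slot_rbx (hslots _ _ (by omega) (by omega))
    slot_ra := by
      rw [hs.readLE (e.reg .rsp) 8 (by omega) (hslots _ _ (by omega) (by omega))]
      exact hcore.slot_ra
    rem := by
      rw [hrem]
      exact hcore.rem
    same := hsame
    code := ProgX.Base.conv_code_in hcode
    abi := habi
  }

/-- **SEGMENT 6** (108284H … 108253H, dgif_lib.c:296-298 and `i++` of l.288; 34 instructions, seven check calls, no contract call):
from `InLoop m` (the loop invariant and `1 ≤ m`: `i < ColorCount`) to `Head (m − 1)` at the loop head. Three times: the checked load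
of `gif.SColorMap` (inside gif), the checked load of `map.Colors` (inside the map object), the checked byte store at
`Colors + 3 · i + k` (inside the colour array: `3 · i + 3 ≤ 3 · ColorCount`). The colour array is 64 bytes away from gif and from
the map object (`sd6_where`), so the walker reads the two pointers through the byte stores by itself. The exit is `sd6_carry`. -/
theorem sd6_seg (Lay : Layout) (hLay : Lay.hi = 0x1000000) (μ : Microarch) (hμ : UserX.MicroOK μ) (u₀ : State)
    (hcode : HasCodeNat Lay u₀ Gif.L.DGifGetScreenDesc.entry Gif.Code.code_DGifGetScreenDesc.nat Gif.L.DGifGetScreenDesc.size)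
    (h_load8 : Asan.SmallCheck Lay μ ProgX.Base.WayInv (ProgX.Base.CodeOK u₀) [.rax, .rcx, .rdx] 8
      ProgX.Base.L.__asan_load8_noabort.entry)
    (h_store1 : Asan.SmallCheck Lay μ ProgX.Base.WayInv (ProgX.Base.CodeOK u₀) [.rax, .rdx] 1
      ProgX.Base.L.__asan_store1_noabort.entry)
    (H : Heap) (rest : List Obj) (frames : List (Nat × FrameLayout)) (F : Forest) (R : Rd) (Hc : Heap) (mp : Map) (m : Nat)
    (e : State) (ret : Word) (v : State)
    (hat : DGifGetScreenDesc.InLoop H rest frames F R Hc mp m u₀ e ret v) :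
    ReachVia Lay μ ProgX.Base.WayInv v (fun w =>
      ∃ m', m' < m ∧ DGifGetScreenDesc.Head Gif.L.DGifGetScreenDesc.at_108253 H rest frames F R Hc mp m' u₀ e ret w) := by
  -- THE PRELUDE: the entry assertion `InLoop` = `Head` at 108284H + `1 ≤ m`
  obtain ⟨hh, hlt⟩ := hat
  have hh0 := hh
  obtain ⟨hcore, hregion, hinv, hok, hidx⟩ := hh
  have he := hcore.entry
  v_entry he
  obtain ⟨henv, hrdi, hscm0⟩ := hcore.pre
  -- what the walker reads of a segment's entry state: rip, rsp and rbx (as `c_…`), the registers kept, the text, DF / MXCSR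
  have w_rip := hcore.rip
  have c_rsp : v.reg .rsp = e.reg .rsp - 120 := hcore.rsp
  have c_rbx : v.reg .rbx = e.reg .rdi := hcore.rbx
  have w_kept : RegsKept [.rsp] v v := RegsKept.refl _ _
  have w_eq : Mem.EqOn ProgX.Base.L.textLo ProgX.Base.L.textHi u₀.mem v.mem := ProgX.Base.conv_code_eqOn hcore.code
  have hdf := (show abiInv _ from hcore.abi).1
  have hmx := (show abiInv _ from hcore.abi).2
  have hsse := ProgX.Base.sseOK_of_abiInv hcore.abi
  -- where the cursor, gif, the map object and the colour array are, as numbers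
  have hcur := henv.ctx.cursor_range henv.heap.inv.shadow
  have hbase : Hc.base = 0x800000 := hregion.1.trans henv.heap.base
  obtain ⟨hgin, hoin, hcin, hfar1, hfar2⟩ := sd6_where hok hinv.heap hbase
  -- the map's two objects are live; its fields [CM1 CM2]
  obtain ⟨hlobj, hlcol, _, hcolf⟩ := hok.scm_live (m := mp) rfl
  obtain ⟨hp, _, _, hc1, hc256⟩ : MapAt (some mp) (GifFileType.SColorMap v.mem F.gif) v.mem := hok.shape.scm
  -- the two loads, as facts about the segment's first memory in the walker's form
  simp only [gfield] at hp hcolf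
  have l_scm : v.mem.readLE (e.reg .rdi + 0x18) 8 = mp.obj := by
    rw [rd_eq_readLE v.mem (e.reg .rdi + 0x18) (F.gif + 24) 8 (by u_omega)]
    exact hp
  have l_col : v.mem.readLE (UInt64.ofNat mp.obj + 0x10) 8 = mp.colors := by
    rw [rd_eq_readLE v.mem (UInt64.ofNat mp.obj + 0x10) (mp.obj + 16) 8 (by u_omega)]
    exact hcolf
  -- `i` in `r13`, a non-negative `int` (`i < ColorCount ≤ 256`): `movsxd rax, r13d` is the register itself
  obtain ⟨x13, c_r13⟩ : ∃ x, v.reg .r13 = x := ⟨_, rfl⟩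
  rw [c_r13] at hidx
  have h31 : x13.toNat < 2 ^ 31 := by omega
  -- the three bytes of `Buf` (`[rsp + 32, rsp + 35)`), as numbers (their values do not matter)
  obtain ⟨b0, l_b0⟩ : ∃ b, v.mem.readLE (e.reg .rsp - 88) 1 = b := ⟨_, rfl⟩
  obtain ⟨b1, l_b1⟩ : ∃ b, v.mem.readLE (e.reg .rsp - 87) 1 = b := ⟨_, rfl⟩
  obtain ⟨b2, l_b2⟩ : ∃ b, v.mem.readLE (e.reg .rsp - 86) 1 = b := ⟨_, rfl⟩
  -- the three live objects the seven checks speak of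
  have hgl : LiveIn (Hc.liveObjs ++ rest) (DGifGetScreenDesc.framesIn frames e) F.gif 120 :=
    hok.gif_live.liveIn rest _ (Nat.le_refl _) (Nat.le_refl _)
  have hol : LiveIn (Hc.liveObjs ++ rest) (DGifGetScreenDesc.framesIn frames e) mp.obj 24 :=
    hlobj.liveIn rest _ (Nat.le_refl _) (Nat.le_refl _)
  have hcl : LiveIn (Hc.liveObjs ++ rest) (DGifGetScreenDesc.framesIn frames e) mp.colors (3 * mp.count) :=
    hlcol.liveIn rest _ (Nat.le_refl _) (Nat.le_refl _)
  -- no call with a contract in this segment: the alignment is not needed, and it slows `omega` down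
  clear he_align
  -- THE WALK, to the loop head
  u_walk hcode [hμ.vendor, Gif.Spec.sext32_small x13 h31] until [Gif.L.DGifGetScreenDesc.at_108253]
    span [ProgX.Base.L.textLo, ProgX.Base.L.textHi] side (v_side)
  case check_108288 =>
    -- dgif_lib.c:296 the load of `gif.SColorMap`: 8 bytes inside gif
    have hun : ShadowUntouched v.mem s_108288.mem := by v_untouched
    exact hgl.accSmall hinv.shadow hun _ 8 (by decide) (by u_omega) (by u_omega)
  case check_108295 =>
    -- dgif_lib.c:296 the load of `map.Colors`: 8 bytes inside the map object
    have hun : ShadowUntouched v.mem s_108295.mem := by v_untouched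
    exact hol.accSmall hinv.shadow hun _ 8 (by decide) (by u_omega) (by u_omega)
  case check_1082b4 =>
    -- dgif_lib.c:296 the store of `Colors[i].Red`: the byte `3 i` of the colour array
    have hun : ShadowUntouched v.mem s_1082b4.mem := by v_untouched
    exact hcl.accSmall hinv.shadow hun _ 1 (by decide) (by u_omega) (by u_omega)
  case check_1082c4 =>
    -- dgif_lib.c:297 the load of `map.Colors`
    have hun : ShadowUntouched v.mem s_1082c4.mem := by v_untouched
    exact hol.accSmall hinv.shadow hun _ 8 (by decide) (by u_omega) (by u_omega)
  case check_1082dd =>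
    -- dgif_lib.c:297 the store of `Colors[i].Green`: the byte `3 i + 1`
    have hun : ShadowUntouched v.mem s_1082dd.mem := by v_untouched
    exact hcl.accSmall hinv.shadow hun _ 1 (by decide) (by u_omega) (by u_omega)
  case check_1082ee =>
    -- dgif_lib.c:298 the load of `map.Colors`
    have hun : ShadowUntouched v.mem s_1082ee.mem := by v_untouched
    exact hol.accSmall hinv.shadow hun _ 8 (by decide) (by u_omega) (by u_omega)
  case check_108302 =>
    -- dgif_lib.c:298 the store of `Colors[i].Blue`: the byte `3 i + 2`
    have hun : ShadowUntouched v.mem s_108302.mem := by v_untouched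
    exact hcl.accSmall hinv.shadow hun _ 1 (by decide) (by u_omega) (by u_omega)
  -- 0x108253 (dgif_lib.c:288): THE LOOP HEAD AGAIN. What was stored: the checks' return address, the element `Colors[i]`
  have hun : ShadowUntouched v.mem s_108310.mem := by v_untouched
  have hs : Mem.SameExcept [⟨(e.reg .rsp).toNat - 128, (e.reg .rsp).toNat - 120⟩,
      ⟨mp.colors + 3 * x13.toNat, mp.colors + 3 * x13.toNat + 3⟩] v.mem s_108310.mem := by
    rw [w_mem]
    u_same
  have habi : (conv u₀).inv s_108310 := by
    refine ProgX.Base.abiInv_of ?_ ?_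
    · rw [w_flags]
      simp only [X86.User.df_setStatus]
      exact w_df_108302
    · rw [w_mxcsr]
      exact hmx
  -- `i + 1` in `r13`: the measure goes down by one
  have hidx' : (s_108310.reg .r13).toNat + (m - 1) = mp.count := by
    rw [w_r13, sd6_inc x13 (by omega)]
    omega
  refine ReachVia.done ⟨m - 1, by omega, ?_⟩
  exact sd6_carry hh0 w_rip w_rsp (w_kept.get .rbx rfl) (w_kept.get .rbp rfl) w_eq habi hun hs (by omega) (by omega) hidx'

end Gif.Spec.DGifGetScreenDesc_6
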